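-- pv_equiv track=rewrite | github.com/Song-of-your-soul/Projector_homework | Homework_9.py | cats_in_hats
-- ===== SOURCE A (Python) =====
-- def pick_cat(pick: int, cats: int) -> list:
--     round = pick
--     picked_cats = []
--     for number in range(cats + 1)[1:]:
--         if number == round:
--             picked_cats.append(number)
--             round += pick
--     return picked_cats
--
-- def cats_in_hats(cats: int, rounds: int) -> list:
--     round = 1
--     cats_with_hats = []
--     while round <= rounds:
--         checked_cats = pick_cat(round, cats)
--         for cat in range(cats + 1)[1:]:
--             if cat in checked_cats:
--                 if cat in cats_with_hats:
--                     cats_with_hats.remove(cat)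
--                 else:
--                     cats_with_hats.append(cat)
--         checked_cats.clear()
--         round += 1
--     return cats_with_hats
-- ===== SOURCE B (Python) =====
-- def cats_in_hats(cats: int, rounds: int) -> list:
--     # Sieve-style: each round visits only its own multiples; rounds beyond
--     # `cats` toggle nothing, so the loop is capped; presence is tracked in an
--     # insertion-ordered dict instead of list membership scans.
--     hats = {}
--     for r in range(1, min(rounds, cats) + 1):
--         for m in range(r, cats + 1, r):
--             if m in hats:
--                 del hats[m]
--             else:
--                 hats[m] = True
--     return list(hats)
-- ===== Notes on version B (the rewrite author's own statement) =====
-- stated objective: faster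
-- what changed: Instead of scanning all cats per round (building pick_cat by a full scan and re-scanning all cats with list membership/remove), B visits only each round's multiples directly via range(r, cats+1, r), caps the round loop at min(rounds, cats) since later rounds toggle nothing, and tracks presence in an insertion-ordered dict, eliminating all linear list scans.
import Mathlib
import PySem

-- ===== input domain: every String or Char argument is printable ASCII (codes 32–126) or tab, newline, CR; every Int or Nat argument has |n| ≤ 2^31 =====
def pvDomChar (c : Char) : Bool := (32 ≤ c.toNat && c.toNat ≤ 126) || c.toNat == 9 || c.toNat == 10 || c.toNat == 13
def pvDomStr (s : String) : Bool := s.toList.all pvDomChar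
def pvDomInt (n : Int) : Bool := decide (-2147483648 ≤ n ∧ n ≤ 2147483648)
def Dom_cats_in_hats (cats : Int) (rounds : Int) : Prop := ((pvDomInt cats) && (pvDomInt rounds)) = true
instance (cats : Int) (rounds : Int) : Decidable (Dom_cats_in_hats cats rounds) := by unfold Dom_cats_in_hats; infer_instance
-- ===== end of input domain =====

-- B replaces A's per-round full scans (pick_cat's scan plus a membership scan over all cats
-- with list remove/append) by direct iteration over each round's multiples, a round cap at
-- min(rounds, cats), and an insertion-ordered dict tracking presence (objective: faster).

-- ===== PORT A =====
-- for number in range(cats + 1)[1:]: if number == round: append; round += pick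
def pick_cat (pick : Int) (cats : Int) : List Int :=
  ((PySem.List.slice (PySem.List.pyRange 0 (cats + 1)) (some 1) none).foldl
    (fun (st : Int × List Int) number =>
      if number = st.1 then (st.1 + pick, st.2 ++ [number]) else st)
    (pick, [])).2

def cats_in_hats (cats : Int) (rounds : Int) : List Int :=
  -- while round <= rounds, round = 1, 2, … : iterations r = 1 .. rounds
  (PySem.List.pyRange 1 (rounds + 1)).foldl
    (fun cats_with_hats r =>
      (PySem.List.slice (PySem.List.pyRange 0 (cats + 1)) (some 1) none).foldl
        (fun cw cat =>
          if cat ∈ pick_cat r cats then  -- checked_cats = pick_cat(round, cats), used here only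
            if cat ∈ cw then
              -- cats_with_hats.remove(cat): cat ∈ cw, so remove? is some here
              (PySem.List.remove? cw cat).getD cw
            else cw ++ [cat]
          else cw)
        cats_with_hats)
    []

-- ===== PORT B =====
def cats_in_hats_alt (cats : Int) (rounds : Int) : List Int :=
  ((PySem.List.pyRange 1 (min rounds cats + 1)).foldl
    (fun d r =>
      (PySem.List.pyRange r (cats + 1) r).foldl
        (fun (d : PySem.Dict Int Bool) m =>
          if d.contains m then d.erase m else d.insert m true)
        d)
    PySem.Dict.empty).keys

-- ===== PRECONDITION & SPEC =====
def Spec_cats_in_hats (cats : Int) (rounds : Int) (out : List Int) : Prop := out = cats_in_hats_alt cats rounds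
instance (cats : Int) (rounds : Int) (out : List Int) : Decidable (Spec_cats_in_hats cats rounds out) := by unfold Spec_cats_in_hats; infer_instance

-- ===== CLAIM (what is proved, stated in full; the proofs are below) =====
def Claim_equal_cats_in_hats : Prop := ∀ (cats : Int) (rounds : Int), Dom_cats_in_hats cats rounds → Spec_cats_in_hats cats rounds (cats_in_hats cats rounds)

-- ===== LEMMAS AND PROOFS =====

-- toggle one cat in the hat list (the common semantics of both round bodies)
def tog (l : List Int) (x : Int) : List Int := if x ∈ l then l.erase x else l ++ [x]

-- the dict-side toggle of B
def dtog (d : PySem.Dict Int Bool) (m : Int) : PySem.Dict Int Bool :=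
  if d.contains m then d.erase m else d.insert m true

-- the common list-level program both ports are reduced to
def listRun (cats R : Int) : List Int :=
  (PySem.List.pyRange 1 (R + 1)).foldl
    (fun cw r => (PySem.List.pyRange r (cats + 1) r).foldl tog cw) []

lemma pyRange_pos_nil {p a b : Int} (hp : 0 < p) (h : b ≤ a) :
    PySem.List.pyRange a b p = [] := by
  rw [PySem.List.pyRange_of_pos _ _ hp]
  simp [show ¬ a < b by omega]

lemma pyRange_pos_cons {p a b : Int} (hp : 0 < p) (h : a < b) :
    PySem.List.pyRange a b p = a :: PySem.List.pyRange (a + p) b p := by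
  rw [PySem.List.pyRange_of_pos _ _ hp, PySem.List.pyRange_of_pos _ _ hp]
  rw [if_pos h]
  have hc : 0 ≤ b - a - 1 := by omega
  have key : (b - a + p - 1) / p = (b - a - 1) / p + 1 := by
    have := Int.add_mul_ediv_right (b - a - 1) 1 hp.ne'
    rw [one_mul] at this
    rw [show b - a + p - 1 = b - a - 1 + p by ring, this]
  have hdn : 0 ≤ (b - a - 1) / p := Int.ediv_nonneg hc hp.le
  have hN : ((b - a + p - 1) / p).toNat = ((b - a - 1) / p).toNat + 1 := by
    rw [key]; omega
  have hM : (if a + p < b then ((b - (a + p) + p - 1) / p).toNat else 0)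
      = ((b - a - 1) / p).toNat := by
    split_ifs with hab
    · rw [show b - (a + p) + p - 1 = b - a - 1 by ring]
    · have : b - a - 1 < p := by omega
      rw [Int.ediv_eq_zero_of_lt hc this]
      rfl
  rw [hN, hM, List.range_succ_eq_map]
  simp only [List.map_cons, List.map_map]
  congr 1
  · simp
  · apply List.map_congr_left
    intro k _
    simp only [Function.comp_apply, Nat.succ_eq_add_one]
    push_cast
    ring

-- range(cats+1)[1:] is range(1, cats+1)
lemma slice_one_pyRange (c : Int) :
    PySem.List.slice (PySem.List.pyRange 0 (c + 1)) (some 1) none = PySem.List.pyRange 1 (c + 1) := by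
  rw [PySem.List.slice_from_one]
  by_cases h : 0 < c + 1
  · rw [PySem.List.pyRange_one_cons h, List.tail_cons]; norm_num
  · rw [PySem.List.pyRange_one_eq_nil (by omega), PySem.List.pyRange_one_eq_nil (by omega)]
    rfl

-- scan invariant: from state (r0, acc), the remaining scan appends range(r0, b, p)
lemma pick_scan {p : Int} (hp : 1 ≤ p) :
    ∀ (n : Nat) (a b r0 : Int) (acc : List Int), (b - a).toNat ≤ n → a ≤ r0 →
      ((PySem.List.pyRange a b).foldl
        (fun (st : Int × List Int) number =>
          if number = st.1 then (st.1 + p, st.2 ++ [number]) else st)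
        (r0, acc)).2 = acc ++ PySem.List.pyRange r0 b p := by
  intro n
  induction n with
  | zero =>
    intro a b r0 acc hn har
    have hba : b ≤ a := by omega
    rw [PySem.List.pyRange_one_eq_nil hba, List.foldl_nil,
      pyRange_pos_nil (by omega) (by omega)]
    simp
  | succ n ih =>
    intro a b r0 acc hn har
    by_cases hab : a < b
    · rw [PySem.List.pyRange_one_cons hab, List.foldl_cons]
      by_cases he : a = r0
      · subst he
        rw [if_pos rfl]
        rw [ih (a + 1) b (a + p) (acc ++ [a]) (by omega) (by omega)]
        rw [pyRange_pos_cons (by omega) hab]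
        simp
      · rw [if_neg he]
        exact ih (a + 1) b r0 acc (by omega) (by omega)
    · rw [PySem.List.pyRange_one_eq_nil (by omega), List.foldl_nil,
        pyRange_pos_nil (by omega) (by omega)]
      simp

-- pick_cat p cats collects exactly the multiples of p in 1..cats, i.e. range(p, cats+1, p)
lemma pick_cat_eq {p : Int} (cats : Int) (hp : 1 ≤ p) :
    pick_cat p cats = PySem.List.pyRange p (cats + 1) p := by
  unfold pick_cat
  rw [slice_one_pyRange]
  rw [pick_scan hp ((cats + 1 - 1).toNat) 1 (cats + 1) p [] (by omega) hp]
  simp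

-- A's guarded full scan is a fold of tog over the filtered list
lemma foldl_if_mem (c : List Int) :
    ∀ (l s : List Int),
      l.foldl (fun cw cat => if cat ∈ c then tog cw cat else cw) s
        = (l.filter (fun x => decide (x ∈ c))).foldl tog s := by
  intro l
  induction l with
  | nil => intro s; rfl
  | cons x xs ih =>
    intro s
    by_cases hx : x ∈ c
    · simp [hx, ih]
    · simp [hx, ih]

-- filtering a nodup list down to one of its sublists returns that sublist
lemma filter_mem_of_sublist {c l : List Int} (h : c.Sublist l) (hn : l.Nodup) :
    l.filter (fun x => decide (x ∈ c)) = c := by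
  induction h with
  | slnil => rfl
  | cons a h ih =>
    rename_i l₁ l₂
    have hnl : l₂.Nodup := hn.of_cons
    have ha : a ∉ l₂ := (List.nodup_cons.mp hn).1
    have hac : a ∉ l₁ := fun hm => ha (h.subset hm)
    simp only [List.filter_cons, decide_eq_true_eq]
    rw [if_neg (by simpa using hac)]
    exact ih hnl
  | cons₂ a h ih =>
    rename_i l₁ l₂
    have hnl : l₂.Nodup := hn.of_cons
    have ha : a ∉ l₂ := (List.nodup_cons.mp hn).1
    simp only [List.filter_cons]
    rw [if_pos (by simp)]
    congr 1
    have hcg : List.filter (fun x => decide (x ∈ a :: l₁)) l₂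
        = List.filter (fun x => decide (x ∈ l₁)) l₂ :=
      List.filter_congr (fun x hx => by
        have hxa : x ≠ a := fun he => ha (he ▸ hx)
        simp [hxa])
    rw [hcg]
    exact ih hnl

lemma pyRange_sublist_lower {b : Int} :
    ∀ (n : Nat) (a a' : Int), a ≤ a' → (b - a).toNat ≤ n →
      (PySem.List.pyRange a' b).Sublist (PySem.List.pyRange a b) := by
  intro n
  induction n with
  | zero =>
    intro a a' h hn
    rw [PySem.List.pyRange_one_eq_nil (by omega)]
    exact List.nil_sublist _
  | succ n ih =>
    intro a a' h hn
    by_cases hab : a < b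
    · by_cases he : a = a'
      · subst he; exact List.Sublist.refl _
      · rw [PySem.List.pyRange_one_cons hab]
        exact (ih (a + 1) a' (by omega) (by omega)).cons a
    · rw [PySem.List.pyRange_one_eq_nil (by omega)]
      rw [PySem.List.pyRange_one_eq_nil (by omega)]

lemma pyRange_mul_sublist_aux {p : Int} (hp : 1 ≤ p) {b : Int} :
    ∀ (n : Nat) (r : Int), 0 < r → (b - r).toNat ≤ n →
      (PySem.List.pyRange r b p).Sublist (PySem.List.pyRange r b) := by
  intro n
  induction n with
  | zero =>
    intro r hr hn
    rw [pyRange_pos_nil (by omega) (by omega)]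
    exact List.nil_sublist _
  | succ n ih =>
    intro r hr hn
    by_cases hrb : r < b
    · rw [pyRange_pos_cons (by omega) hrb, PySem.List.pyRange_one_cons hrb]
      apply List.Sublist.cons₂
      have h1 : (PySem.List.pyRange (r + p) b p).Sublist (PySem.List.pyRange (r + p) b) :=
        ih (r + p) (by omega) (by omega)
      exact h1.trans (pyRange_sublist_lower ((b - (r + 1)).toNat) (r + 1) (r + p) (by omega) (by omega))
    · rw [pyRange_pos_nil (by omega) (by omega)]
      exact List.nil_sublist _

-- the multiples of p form a sublist of range(1, b)
lemma pyRange_mul_sublist {p : Int} (b : Int) (hp : 1 ≤ p) :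
    (PySem.List.pyRange p b p).Sublist (PySem.List.pyRange 1 b) := by
  have h1 := pyRange_mul_sublist_aux hp ((b - p).toNat) p (by omega) (le_refl _)
  exact h1.trans (pyRange_sublist_lower ((b - 1).toNat) 1 p hp (le_refl _))

lemma cats_in_hats_eq_listRun (cats rounds : Int) :
    cats_in_hats cats rounds = listRun cats rounds := by
  unfold cats_in_hats listRun
  apply PySem.List.foldl_congr_mem
  intro acc r hr
  have hr1 : 1 ≤ r := (PySem.List.mem_pyRange_one.mp hr).1
  rw [slice_one_pyRange, pick_cat_eq cats hr1]
  have hfun : ∀ (cw : List Int) (cat : Int),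
      (if cat ∈ PySem.List.pyRange r (cats + 1) r then
        if cat ∈ cw then (PySem.List.remove? cw cat).getD cw else cw ++ [cat]
      else cw)
      = (if cat ∈ PySem.List.pyRange r (cats + 1) r then tog cw cat else cw) := by
    intro cw cat
    unfold tog
    by_cases h1 : cat ∈ PySem.List.pyRange r (cats + 1) r
    · rw [if_pos h1, if_pos h1]
      by_cases h2 : cat ∈ cw
      · rw [if_pos h2, if_pos h2, PySem.List.remove?_eq_some_erase cw cat h2]
        rfl
      · rw [if_neg h2, if_neg h2]
    · rw [if_neg h1, if_neg h1]
  rw [PySem.List.foldl_congr_mem _ _ _ acc (fun cw cat _ => hfun cw cat)]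
  rw [foldl_if_mem]
  rw [filter_mem_of_sublist (pyRange_mul_sublist (cats + 1) hr1)
    (PySem.List.nodup_pyRange_one 1 (cats + 1))]

-- rounds whose multiple list is empty leave the state unchanged
lemma foldl_inner_nil {cats : Int} :
    ∀ (l : List Int) (s : List Int), (∀ r ∈ l, PySem.List.pyRange r (cats + 1) r = []) →
      l.foldl (fun cw r => (PySem.List.pyRange r (cats + 1) r).foldl tog cw) s = s := by
  intro l
  induction l with
  | nil => intro s _; rfl
  | cons x xs ih =>
    intro s h
    rw [List.foldl_cons, h x (List.mem_cons_self), List.foldl_nil]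
    exact ih s (fun r hr => h r (List.mem_cons_of_mem x hr))

-- rounds beyond cats toggle nothing: the round loop can be capped at min(rounds, cats)
lemma listRun_cap (cats rounds : Int) :
    listRun cats rounds = listRun cats (min rounds cats) := by
  rcases le_or_gt rounds cats with h | h
  · rw [min_eq_left h]
  · rw [min_eq_right h.le]
    unfold listRun
    by_cases hc : 0 ≤ cats
    · rw [PySem.List.pyRange_one_append 1 (cats + 1) (rounds + 1) (by omega) (by omega),
        List.foldl_append]
      apply foldl_inner_nil
      intro r hr
      have := PySem.List.mem_pyRange_one.mp hr
      exact pyRange_pos_nil (by omega) (by omega)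
    · rw [PySem.List.pyRange_one_eq_nil (show cats + 1 ≤ 1 by omega), List.foldl_nil]
      apply foldl_inner_nil
      intro r hr
      have := PySem.List.mem_pyRange_one.mp hr
      exact pyRange_pos_nil (by omega) (by omega)

lemma dict_contains_of_items {d : PySem.Dict Int Bool} {hats : List Int} (m : Int)
    (hi : d.items = hats.map (fun x => (x, true))) : d.contains m = decide (m ∈ hats) := by
  simp only [PySem.Dict.contains, hi, List.any_map]
  rw [show ((fun (p : Int × Bool) => p.1 == m) ∘ fun x => (x, true)) = fun x => x == m from rfl]
  rw [List.any_beq']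
  simp

-- one dict toggle tracks one list toggle (items are the hats paired with true)
lemma dtog_items {d : PySem.Dict Int Bool} {hats : List Int} (m : Int)
    (hn : hats.Nodup) (hi : d.items = hats.map (fun x => (x, true))) :
    (dtog d m).items = (tog hats m).map (fun x => (x, true)) ∧ (tog hats m).Nodup := by
  unfold dtog tog
  rw [dict_contains_of_items m hi]
  by_cases hm : m ∈ hats
  · rw [if_pos (by simpa using hm), if_pos hm]
    refine ⟨?_, hn.erase m⟩
    simp only [PySem.Dict.erase, hi, List.filter_map]
    rw [hn.erase_eq_filter m]
    congr 1
  · rw [if_neg (by simpa using hm), if_neg hm]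
    constructor
    · simp only [PySem.Dict.insert, dict_contains_of_items m hi]
      rw [if_neg (by simpa using hm)]
      simp [hi]
    · simp only [List.Nodup, List.pairwise_append]
      refine ⟨hn, List.pairwise_singleton _ _, ?_⟩
      intro a ha b hb
      simp only [List.mem_singleton] at hb
      subst hb
      intro h
      exact hm (h ▸ ha)

-- the whole nested fold of B tracks the nested fold of tog
lemma foldl2_dtog_items (cats : Int) :
    ∀ (l : List Int) (d : PySem.Dict Int Bool) (hats : List Int),
      hats.Nodup → d.items = hats.map (fun x => (x, true)) →
      (l.foldl (fun d r => (PySem.List.pyRange r (cats + 1) r).foldl dtog d) d).items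
        = (l.foldl (fun cw r => (PySem.List.pyRange r (cats + 1) r).foldl tog cw) hats).map
            (fun x => (x, true)) ∧
      (l.foldl (fun cw r => (PySem.List.pyRange r (cats + 1) r).foldl tog cw) hats).Nodup := by
  have inner : ∀ (l : List Int) (d : PySem.Dict Int Bool) (hats : List Int),
      hats.Nodup → d.items = hats.map (fun x => (x, true)) →
      (l.foldl dtog d).items = (l.foldl tog hats).map (fun x => (x, true)) ∧
        (l.foldl tog hats).Nodup := by
    intro l
    induction l with
    | nil => intro d hats hn hi; exact ⟨hi, hn⟩
    | cons x xs ih =>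
      intro d hats hn hi
      obtain ⟨h1, h2⟩ := dtog_items x hn hi
      exact ih (dtog d x) (tog hats x) h2 h1
  intro l
  induction l with
  | nil => intro d hats hn hi; exact ⟨hi, hn⟩
  | cons x xs ih =>
    intro d hats hn hi
    obtain ⟨h1, h2⟩ := inner (PySem.List.pyRange x (cats + 1) x) d hats hn hi
    exact ih _ _ h2 h1

lemma cats_in_hats_alt_eq_listRun (cats rounds : Int) :
    cats_in_hats_alt cats rounds = listRun cats (min rounds cats) := by
  unfold cats_in_hats_alt listRun
  have hbody : (fun (d : PySem.Dict Int Bool) r =>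
      (PySem.List.pyRange r (cats + 1) r).foldl
        (fun d m => if d.contains m then d.erase m else d.insert m true) d)
      = (fun d r => (PySem.List.pyRange r (cats + 1) r).foldl dtog d) := rfl
  rw [hbody]
  obtain ⟨h1, _⟩ := foldl2_dtog_items cats (PySem.List.pyRange 1 (min rounds cats + 1))
    PySem.Dict.empty [] List.nodup_nil rfl
  simp only [PySem.Dict.keys, h1, List.map_map]
  exact List.map_id'' (fun x => rfl) _

-- ===== VERDICT (by name: the statement is the Claim_ definition above) =====
theorem cats_in_hats_spec : Claim_equal_cats_in_hats := by
  intro cats rounds _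
  unfold Spec_cats_in_hats
  rw [cats_in_hats_eq_listRun, listRun_cap, cats_in_hats_alt_eq_listRun]
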